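-- pv_equiv track=rewrite | github.com/cornhundred/citibike-clustergrammer2 | notebooks/himc_helper_functions_v0_12_3.py | filter_ribo_mito_from_list
-- ===== SOURCE A (Python) =====
-- def filter_ribo_mito_from_list(all_genes):
--
--     # find ribosomal genes
--     ribo_rpl = [x for x in all_genes if 'RPL' in x]
--     ribo_rps = [x for x in all_genes if 'RPS' in x]
--     ribo_genes = ribo_rpl + ribo_rps
--
--
--     # Find mitochondrial genes
--     list_mito_genes = ['MTRNR2L11', 'MTRF1', 'MTRNR2L12', 'MTRNR2L13', 'MTRF1L', 'MTRNR2L6', 'MTRNR2L7',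
--                     'MTRNR2L10', 'MTRNR2L8', 'MTRNR2L5', 'MTRNR2L1', 'MTRNR2L3', 'MTRNR2L4']
--
--     mito_genes = [x for x in all_genes if 'MT-' == x[:3] or
--                  x.split('_')[0] in list_mito_genes]
--
--
--     # filter genes
--     keep_genes = [x for x in all_genes if x not in ribo_genes]
--     keep_genes = [x for x in keep_genes if x not in mito_genes]
--
--     return keep_genes
-- ===== SOURCE B (Python) =====
-- def filter_ribo_mito_from_list(all_genes):
--     # one pass, predicates inlined; no intermediate ribo/mito lists
--     list_mito_genes = ['MTRNR2L11', 'MTRF1', 'MTRNR2L12', 'MTRNR2L13', 'MTRF1L', 'MTRNR2L6', 'MTRNR2L7',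
--                     'MTRNR2L10', 'MTRNR2L8', 'MTRNR2L5', 'MTRNR2L1', 'MTRNR2L3', 'MTRNR2L4']
--     return [x for x in all_genes
--             if not ('RPL' in x or 'RPS' in x)
--             and not (x[:3] == 'MT-' or x.split('_')[0] in list_mito_genes)]
-- ===== Notes on version B (the rewrite author's own statement) =====
-- stated objective: simpler
-- what changed: Replaced A's four intermediate list builds and its two 'not in list' membership filters by a single comprehension over all_genes with the ribo/mito predicates inlined.
import Mathlib
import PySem

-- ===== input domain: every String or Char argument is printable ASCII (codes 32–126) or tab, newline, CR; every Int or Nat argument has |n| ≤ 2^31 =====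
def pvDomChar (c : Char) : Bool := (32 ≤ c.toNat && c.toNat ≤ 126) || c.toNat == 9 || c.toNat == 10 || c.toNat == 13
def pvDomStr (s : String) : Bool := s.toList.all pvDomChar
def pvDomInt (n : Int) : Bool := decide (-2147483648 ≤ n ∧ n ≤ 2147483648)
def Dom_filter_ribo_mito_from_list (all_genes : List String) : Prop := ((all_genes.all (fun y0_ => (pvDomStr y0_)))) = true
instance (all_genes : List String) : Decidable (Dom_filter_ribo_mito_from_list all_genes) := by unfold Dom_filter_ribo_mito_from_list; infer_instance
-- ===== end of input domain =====

-- B: one pass over all_genes with the ribo/mito predicates inlined, instead of A's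
-- four intermediate lists and 'not in list' membership filters.

-- ===== PORT A =====
-- x.split('_')[0] is ported as headD "": Python's split always returns a nonempty
-- list, so the [0] never raises and headD's default is never used (exact).
def filter_ribo_mito_from_list (all_genes : List String) : List String :=
  let ribo_rpl := all_genes.filter (fun x => PySem.Str.isIn "RPL" x)
  let ribo_rps := all_genes.filter (fun x => PySem.Str.isIn "RPS" x)
  let ribo_genes := ribo_rpl ++ ribo_rps
  let list_mito_genes : List String := ["MTRNR2L11", "MTRF1", "MTRNR2L12", "MTRNR2L13", "MTRF1L", "MTRNR2L6", "MTRNR2L7",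
                    "MTRNR2L10", "MTRNR2L8", "MTRNR2L5", "MTRNR2L1", "MTRNR2L3", "MTRNR2L4"]
  let mito_genes := all_genes.filter (fun x => ("MT-" == PySem.Str.slice x none (some 3)) ||
                 list_mito_genes.contains ((((PySem.Str.split? x "_").getD []).headD "")))
  let keep_genes := all_genes.filter (fun x => !(ribo_genes.contains x))
  let keep_genes2 := keep_genes.filter (fun x => !(mito_genes.contains x))
  keep_genes2

-- ===== PORT B =====
def filter_ribo_mito_from_list_alt (all_genes : List String) : List String :=
  let list_mito_genes : List String := ["MTRNR2L11", "MTRF1", "MTRNR2L12", "MTRNR2L13", "MTRF1L", "MTRNR2L6", "MTRNR2L7",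
                    "MTRNR2L10", "MTRNR2L8", "MTRNR2L5", "MTRNR2L1", "MTRNR2L3", "MTRNR2L4"]
  all_genes.filter (fun x =>
    !(PySem.Str.isIn "RPL" x || PySem.Str.isIn "RPS" x) &&
    !((PySem.Str.slice x none (some 3) == "MT-") ||
      list_mito_genes.contains ((((PySem.Str.split? x "_").getD []).headD ""))))

-- ===== PRECONDITION & SPEC =====
def Spec_filter_ribo_mito_from_list (all_genes : List String) (out : List String) : Prop := out = filter_ribo_mito_from_list_alt all_genes
instance (all_genes : List String) (out : List String) : Decidable (Spec_filter_ribo_mito_from_list all_genes out) := by unfold Spec_filter_ribo_mito_from_list; infer_instance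

-- ===== CLAIM (what is proved, stated in full; the proofs are below) =====
def Claim_equal_filter_ribo_mito_from_list : Prop := ∀ (all_genes : List String), Dom_filter_ribo_mito_from_list all_genes → Spec_filter_ribo_mito_from_list all_genes (filter_ribo_mito_from_list all_genes)

-- ===== LEMMAS AND PROOFS =====

-- membership in 'l.filter p' for an element of l is exactly 'p x'
theorem contains_filter_of_mem {α : Type} [BEq α] [LawfulBEq α] (l : List α) (p : α → Bool)
    (x : α) (hx : x ∈ l) : (l.filter p).contains x = p x := by
  by_cases h : p x = true
  · simp [List.mem_filter, hx, h]
  · simp only [Bool.not_eq_true] at h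
    simp [List.mem_filter, h]

theorem contains_append_filters {α : Type} [BEq α] [LawfulBEq α] (l : List α) (p q : α → Bool)
    (x : α) (hx : x ∈ l) :
    ((l.filter p ++ l.filter q).contains x) = (p x || q x) := by
  simp [List.mem_filter, hx]

-- ===== VERDICT (by name: the statement is the Claim_ definition above) =====
theorem filter_ribo_mito_from_list_spec : Claim_equal_filter_ribo_mito_from_list := by
  intro all_genes _
  unfold Spec_filter_ribo_mito_from_list filter_ribo_mito_from_list filter_ribo_mito_from_list_alt
  simp only [List.filter_filter]
  apply List.filter_congr
  intro x hx
  rw [contains_append_filters _ _ _ _ hx, contains_filter_of_mem _ _ _ hx]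
  have : ("MT-" == PySem.Str.slice x none (some 3)) = (PySem.Str.slice x none (some 3) == "MT-") :=
    Bool.beq_comm
  rw [this]
  simp [Bool.not_or, Bool.and_comm]
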